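-- pv_equiv track=rewrite | github.com/RuiBoGithub/LR | archive/classify_papers copy.py | sampling_to_resolution
-- ===== SOURCE A (Python) =====
-- def sampling_to_resolution(sampling_mentions):
--     # Any Hz or seconds/minutes -> subhourly
--     for h in sampling_mentions:
--         unit = (h["unit"] or "").lower()
--         if unit in ("hz", "/s", "s", "sec", "second", "min", "minute", "/min", "5-min", "15-min", "1-min", "30-s", "10-second", "subhourly"):
--             return "subhourly"
--     # Hourly tokens
--     for h in sampling_mentions:
--         unit = (h["unit"] or "").lower()
--         if unit in ("h", "hr", "hour", "/hour", "hourly", "per hour", "1-hour"):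
--             return "hourly"
--     # Daily/monthly/yearly hints (rare as sampling, but handle)
--     for h in sampling_mentions:
--         unit = (h["unit"] or "").lower()
--         if "daily" in unit: return "daily"
--         if "monthly" in unit: return "monthly"
--         if "year" in unit or "annual" in unit: return "yearly"
--     return None
-- ===== SOURCE B (Python) =====
-- _SUB = {"hz", "/s", "s", "sec", "second", "min", "minute", "/min",
--         "5-min", "15-min", "1-min", "30-s", "10-second", "subhourly"}
-- _HOUR = {"h", "hr", "hour", "/hour", "hourly", "per hour", "1-hour"}
--
--
-- def _category(unit):
--     # (name, priority rank): subhourly > hourly > daily-tier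
--     if unit in _SUB:
--         return ("subhourly", 3)
--     if unit in _HOUR:
--         return ("hourly", 2)
--     if "daily" in unit:
--         return ("daily", 1)
--     if "monthly" in unit:
--         return ("monthly", 1)
--     if "year" in unit or "annual" in unit:
--         return ("yearly", 1)
--     return None
--
--
-- def sampling_to_resolution(sampling_mentions):
--     best = None  # (name, rank) with the highest rank seen; first one of its rank wins
--     for h in sampling_mentions:
--         cat = _category((h["unit"] or "").lower())
--         if cat is None:
--             continue
--         if cat[1] == 3:
--             return cat[0]
--         if best is None or cat[1] > best[1]:
--             best = cat
--     return best[0] if best is not None else None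
-- ===== Notes on version B (the rewrite author's own statement) =====
-- stated objective: alternative
-- what changed: A's three sequential full scans (subhourly, then hourly, then daily/monthly/yearly) are replaced by a single pass that classifies each mention once and keeps the first category of the highest priority rank seen, exiting early on subhourly.
import Mathlib
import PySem

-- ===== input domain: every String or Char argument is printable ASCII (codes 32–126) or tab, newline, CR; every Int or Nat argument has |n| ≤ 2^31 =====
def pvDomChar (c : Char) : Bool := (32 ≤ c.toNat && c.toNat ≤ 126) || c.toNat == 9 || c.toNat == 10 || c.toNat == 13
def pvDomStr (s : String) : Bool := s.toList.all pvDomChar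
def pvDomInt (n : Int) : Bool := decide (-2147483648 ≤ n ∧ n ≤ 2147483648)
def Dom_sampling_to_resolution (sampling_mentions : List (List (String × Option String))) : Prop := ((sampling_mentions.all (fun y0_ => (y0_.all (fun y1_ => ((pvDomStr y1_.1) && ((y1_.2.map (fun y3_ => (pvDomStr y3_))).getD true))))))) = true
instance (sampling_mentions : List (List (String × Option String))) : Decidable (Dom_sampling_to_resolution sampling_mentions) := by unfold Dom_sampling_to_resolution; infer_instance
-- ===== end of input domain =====

-- B replaces A's three sequential scans by a single pass that classifies each
-- mention once and keeps the best-ranked category (objective: alternative /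
-- one pass; equivalence of the RETURN value is what is proved).

-- ===== PORT A =====
-- unit = (h["unit"] or "").lower(); a missing "unit" key (KeyError in Python)
-- is mapped to "" here and excluded by Pre_ below.
def pvUnitA (h : List (String × Option String)) : String :=
  PySem.Str.lower ((((PySem.Dict.mk h).get? "unit").getD none).getD "")

def subUnitsA : List String :=
  ["hz", "/s", "s", "sec", "second", "min", "minute", "/min",
   "5-min", "15-min", "1-min", "30-s", "10-second", "subhourly"]

def hourUnitsA : List String :=
  ["h", "hr", "hour", "/hour", "hourly", "per hour", "1-hour"]

def loopSub : List (List (String × Option String)) → Option String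
  | [] => none
  | h :: t => if pvUnitA h ∈ subUnitsA then some "subhourly" else loopSub t

def loopHour : List (List (String × Option String)) → Option String
  | [] => none
  | h :: t => if pvUnitA h ∈ hourUnitsA then some "hourly" else loopHour t

def loopDmy : List (List (String × Option String)) → Option String
  | [] => none
  | h :: t =>
    if PySem.Str.isIn "daily" (pvUnitA h) then some "daily"
    else if PySem.Str.isIn "monthly" (pvUnitA h) then some "monthly"
    else if PySem.Str.isIn "year" (pvUnitA h) || PySem.Str.isIn "annual" (pvUnitA h) then some "yearly"
    else loopDmy t

def sampling_to_resolution (sampling_mentions : List (List (String × Option String))) : Option String :=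
  match loopSub sampling_mentions with
  | some r => some r
  | none =>
    match loopHour sampling_mentions with
    | some r => some r
    | none => loopDmy sampling_mentions

-- ===== PORT B =====
def pvUnitB (h : List (String × Option String)) : String :=
  PySem.Str.lower ((((PySem.Dict.mk h).get? "unit").getD none).getD "")

def bSub : PySem.Set String :=
  PySem.Set.ofList ["hz", "/s", "s", "sec", "second", "min", "minute", "/min",
                    "5-min", "15-min", "1-min", "30-s", "10-second", "subhourly"]

def bHour : PySem.Set String :=
  PySem.Set.ofList ["h", "hr", "hour", "/hour", "hourly", "per hour", "1-hour"]

def bCategory (u : String) : Option (String × Int) :=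
  if u ∈ bSub then some ("subhourly", 3)
  else if u ∈ bHour then some ("hourly", 2)
  else if PySem.Str.isIn "daily" u then some ("daily", 1)
  else if PySem.Str.isIn "monthly" u then some ("monthly", 1)
  else if PySem.Str.isIn "year" u || PySem.Str.isIn "annual" u then some ("yearly", 1)
  else none

def bGo (best : Option (String × Int)) : List (List (String × Option String)) → Option String
  | [] => best.map Prod.fst
  | h :: t =>
    match bCategory (pvUnitB h) with
    | none => bGo best t
    | some c =>
      if c.2 == 3 then some c.1
      else
        match best with
        | none => bGo (some c) t
        | some b => if c.2 > b.2 then bGo (some c) t else bGo best t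

def sampling_to_resolution_alt (sampling_mentions : List (List (String × Option String))) : Option String :=
  bGo none sampling_mentions

-- ===== PRECONDITION & SPEC =====
-- Pre_ admits exactly the inputs on which Python A returns: a mention without a
-- "unit" key raises KeyError unless a subhourly mention strictly precedes it
-- (then A returns before reaching it).  B raises at exactly the same inputs.
def Pre_sampling_to_resolution (sampling_mentions : List (List (String × Option String))) : Prop :=
  ∀ j ∈ List.range sampling_mentions.length,
    (PySem.Dict.mk (sampling_mentions.getD j [])).contains "unit" = false →
    ∃ i ∈ List.range j, pvUnitA (sampling_mentions.getD i []) ∈ subUnitsA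

instance (sampling_mentions : List (List (String × Option String))) : Decidable (Pre_sampling_to_resolution sampling_mentions) := by unfold Pre_sampling_to_resolution; infer_instance

def pvWitness_sampling_to_resolution : (List (List (String × Option String))) :=
  [[("unit", some "Hz")], [("unit", none)], [("unit", some "daily mean")]]

def Spec_sampling_to_resolution (sampling_mentions : List (List (String × Option String))) (out : Option String) : Prop := out = sampling_to_resolution_alt sampling_mentions
instance (sampling_mentions : List (List (String × Option String))) (out : Option String) : Decidable (Spec_sampling_to_resolution sampling_mentions out) := by unfold Spec_sampling_to_resolution; infer_instance

-- ===== CLAIM (what is proved, stated in full; the proofs are below) =====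
def Claim_equal_sampling_to_resolution : Prop := ∀ (sampling_mentions : List (List (String × Option String))), Dom_sampling_to_resolution sampling_mentions → Pre_sampling_to_resolution sampling_mentions → Spec_sampling_to_resolution sampling_mentions (sampling_to_resolution sampling_mentions)

-- ===== LEMMAS AND PROOFS =====
lemma pvUnitB_eq (h : List (String × Option String)) : pvUnitB h = pvUnitA h := rfl

lemma bSub_eq : ∀ u : String, u ∈ bSub ↔ u ∈ subUnitsA := by
  have : bSub = subUnitsA := by decide
  simp [this]

lemma bHour_eq : ∀ u : String, u ∈ bHour ↔ u ∈ hourUnitsA := by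
  have : bHour = hourUnitsA := by decide
  simp [this]

lemma bGo_two (s : String) :
    ∀ xs, bGo (some (s, 2)) xs = some ((loopSub xs).getD s) := by
  intro xs
  induction xs with
  | nil => rfl
  | cons h t ih =>
    by_cases h1 : pvUnitA h ∈ subUnitsA
    · simp [bGo, bCategory, loopSub, pvUnitB_eq, bSub_eq, h1]
    · by_cases h2 : pvUnitA h ∈ hourUnitsA
      · simp [bGo, bCategory, loopSub, pvUnitB_eq, bSub_eq, bHour_eq, h1, h2, ih]
      · simp only [bGo, bCategory, pvUnitB_eq, bSub_eq, bHour_eq, loopSub]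
        split_ifs <;> simp [ih]

lemma bGo_one (s : String) :
    ∀ xs, bGo (some (s, 1)) xs = some ((loopSub xs).getD ((loopHour xs).getD s)) := by
  intro xs
  induction xs with
  | nil => rfl
  | cons h t ih =>
    by_cases h1 : pvUnitA h ∈ subUnitsA
    · simp [bGo, bCategory, loopSub, pvUnitB_eq, bSub_eq, h1]
    · by_cases h2 : pvUnitA h ∈ hourUnitsA
      · simp [bGo, bCategory, loopSub, loopHour, pvUnitB_eq, bSub_eq, bHour_eq, h1, h2, bGo_two]
      · simp only [bGo, bCategory, pvUnitB_eq, bSub_eq, bHour_eq, loopSub, loopHour]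
        split_ifs <;> simp [ih]

lemma bGo_none :
    ∀ xs, bGo none xs = (loopSub xs).or ((loopHour xs).or (loopDmy xs)) := by
  intro xs
  induction xs with
  | nil => rfl
  | cons h t ih =>
    by_cases h1 : pvUnitA h ∈ subUnitsA
    · simp [bGo, bCategory, loopSub, pvUnitB_eq, bSub_eq, h1]
    · by_cases h2 : pvUnitA h ∈ hourUnitsA
      · simp [bGo, bCategory, loopSub, loopHour, pvUnitB_eq, bSub_eq, bHour_eq, h1, h2, bGo_two]
      · simp only [bGo, bCategory, pvUnitB_eq, bSub_eq, bHour_eq, loopSub, loopHour, loopDmy]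
        split_ifs with h3 h4 h5 <;> simp [bGo_one, ih]

-- ===== VERDICT (by name: the statement is the Claim_ definition above) =====
theorem sampling_to_resolution_spec : Claim_equal_sampling_to_resolution := by
  intro xs _dom _pre
  show sampling_to_resolution xs = sampling_to_resolution_alt xs
  rw [sampling_to_resolution_alt, bGo_none]
  unfold sampling_to_resolution
  cases e1 : loopSub xs <;> cases e2 : loopHour xs <;> simp [Option.or]
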